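-- pv_equiv track=rewrite | github.com/dev-rachna/Programming_Problems | Arrays/MISC/StrictlyIncreasingSubarrays.py | countIncreasing
-- ===== SOURCE A (Python) =====
-- def countIncreasing(arr, n):
--     length=1
--     count=0
--     for i in range(len(arr)-1):
--         if arr[i]<arr[i+1]:
--             length+=1
--         else:
--             count+=(length*(length-1))//2
--             length=1
--
--     if length!=1:
--         count+=(length*(length-1))//2
--
--     return count
-- ===== SOURCE B (Python) =====
-- def countIncreasing(arr, n):
--     total = 0
--     cur = 0
--     for a, b in zip(arr, arr[1:]):
--         if a < b:
--             cur += 1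
--             total += cur
--         else:
--             cur = 0
--     return total
-- ===== Notes on version B (the rewrite author's own statement) =====
-- stated objective: simpler
-- what changed: B replaces A's maximal-run detection with the L*(L-1)//2 closed form and final flush by a single incremental accumulator over zip(arr, arr[1:]) (cur = increasing subarrays ending here, added to the total each step), needing no run-length arithmetic and no end-of-loop flush.
import Mathlib
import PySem

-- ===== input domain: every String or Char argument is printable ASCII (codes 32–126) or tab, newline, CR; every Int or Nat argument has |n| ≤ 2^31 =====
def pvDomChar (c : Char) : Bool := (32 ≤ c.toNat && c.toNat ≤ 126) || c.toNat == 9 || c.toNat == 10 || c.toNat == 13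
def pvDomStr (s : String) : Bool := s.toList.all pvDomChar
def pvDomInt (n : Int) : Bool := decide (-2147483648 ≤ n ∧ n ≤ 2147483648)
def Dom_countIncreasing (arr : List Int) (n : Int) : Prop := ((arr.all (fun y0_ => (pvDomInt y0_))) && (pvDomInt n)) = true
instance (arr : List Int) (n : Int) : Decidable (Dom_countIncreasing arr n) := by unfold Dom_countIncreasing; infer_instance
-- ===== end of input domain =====

-- B replaces A's run-length closed form and end-of-loop flush by one incremental accumulator
-- over adjacent pairs (objective: simpler; same O(n) cost).

-- ===== PORT A =====
-- one loop step of A: state (length, count), compared pair (x, y) = (arr[i], arr[i+1])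
def stepA (st : Int × Int) (x y : Int) : Int × Int :=
  if x < y then (st.1 + 1, st.2)
  else (1, st.2 + PySem.Int.floordiv (st.1 * (st.1 - 1)) 2)

-- arr[i], arr[i+1]: indices from range(len(arr)-1) are always in range, so pyGetD is exact here
def countIncreasing (arr : List Int) (n : Int) : Int :=
  let s := (PySem.List.pyRange 0 ((arr.length : Int) - 1) 1).foldl
      (fun st i => stepA st (PySem.List.pyGetD arr i 0) (PySem.List.pyGetD arr (i + 1) 0)) (1, 0)
  if s.1 ≠ 1 then s.2 + PySem.Int.floordiv (s.1 * (s.1 - 1)) 2 else s.2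

-- ===== PORT B =====
-- Source B's loop over zip(arr, arr[1:]) as structural recursion on the adjacent pairs
def altGo : List Int → Int → Int → Int
  | a :: b :: rest, cur, total =>
      if a < b then altGo (b :: rest) (cur + 1) (total + (cur + 1))
      else altGo (b :: rest) 0 total
  | _, _, total => total

def countIncreasing_alt (arr : List Int) (n : Int) : Int := altGo arr 0 0

-- ===== PRECONDITION & SPEC =====
def Spec_countIncreasing (arr : List Int) (n : Int) (out : Int) : Prop := out = countIncreasing_alt arr n
instance (arr : List Int) (n : Int) (out : Int) : Decidable (Spec_countIncreasing arr n out) := by unfold Spec_countIncreasing; infer_instance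

-- ===== CLAIM (what is proved, stated in full; the proofs are below) =====
def Claim_equal_countIncreasing : Prop := ∀ (arr : List Int) (n : Int), Dom_countIncreasing arr n → Spec_countIncreasing arr n (countIncreasing arr n)

-- ===== LEMMAS AND PROOFS =====

-- A's loop as structural recursion on the list
def aGo : List Int → Int × Int → Int × Int
  | a :: b :: rest, st => aGo (b :: rest) (stepA st a b)
  | _, st => st

def tri (l : Int) : Int := PySem.Int.floordiv (l * (l - 1)) 2

theorem tri_one : tri 1 = 0 := by decide

theorem tri_succ (l : Int) : tri (l + 1) = tri l + l := by
  obtain ⟨k, hk⟩ : ∃ k, l * (l - 1) = 2 * k := by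
    rcases Int.even_or_odd l with ⟨m, hm⟩ | ⟨m, hm⟩
    · exact ⟨m * (l - 1), by rw [hm]; ring⟩
    · exact ⟨l * m, by rw [hm]; ring⟩
  have h1 : (l + 1) * (l + 1 - 1) = 2 * (k + l) := by
    have : (l + 1) * (l + 1 - 1) = l * (l - 1) + 2 * l := by ring
    omega
  unfold tri
  rw [h1, hk, PySem.Int.floordiv_eq_ediv_of_pos (by omega), PySem.Int.floordiv_eq_ediv_of_pos (by omega),
      Int.mul_ediv_cancel_left _ (by omega), Int.mul_ediv_cancel_left _ (by omega)]

-- index loop (over Nat range, getD access) = structural recursion aGo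
theorem natfold_eq_aGo (arr : List Int) (st : Int × Int) :
    (List.range (arr.length - 1)).foldl
        (fun s k => stepA s (arr.getD k 0) (arr.getD (k + 1) 0)) st = aGo arr st := by
  induction arr generalizing st with
  | nil => simp [aGo]
  | cons a rest ih =>
    cases rest with
    | nil => simp [aGo]
    | cons b t =>
      have hlen : (a :: b :: t).length - 1 = (b :: t).length - 1 + 1 := by
        simp
      rw [hlen, List.range_succ_eq_map, List.foldl_cons, List.foldl_map]
      simpa [aGo] using ih (stepA st a b)

-- A's pyRange/pyGetD loop = the Nat-range loop
theorem pyfold_eq_natfold (arr : List Int) (st : Int × Int) :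
    (PySem.List.pyRange 0 ((arr.length : Int) - 1) 1).foldl
        (fun s i => stepA s (PySem.List.pyGetD arr i 0) (PySem.List.pyGetD arr (i + 1) 0)) st
      = (List.range (arr.length - 1)).foldl
        (fun s k => stepA s (arr.getD k 0) (arr.getD (k + 1) 0)) st := by
  have h : ((arr.length : Int) - 1) = ((arr.length - 1 : Nat) : Int) ∨ arr.length = 0 := by
    cases arr
    · simp
    · left; simp
  rcases h with h | h
  · rw [h, PySem.List.pyRange_zero_nat, List.foldl_map]
    apply PySem.List.foldl_congr_mem
    intro s k _
    have h1 : ((k : Nat) : Int) + 1 = ((k + 1 : Nat) : Int) := by push_cast; ring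
    rw [h1, PySem.List.pyGetD_natCast, PySem.List.pyGetD_natCast]
  · rw [h]
    rw [PySem.List.pyRange_one_eq_nil (show ((0 : Nat) : Int) - 1 ≤ 0 by norm_num)]
    simp

-- invariant: the length component stays ≥ 1
theorem aGo_fst_pos (arr : List Int) (st : Int × Int) (h : 1 ≤ st.1) :
    1 ≤ (aGo arr st).1 := by
  induction arr generalizing st with
  | nil => simpa [aGo]
  | cons a rest ih =>
    cases rest with
    | nil => simpa [aGo]
    | cons b t =>
      show 1 ≤ (aGo (b :: t) (stepA st a b)).1
      apply ih
      unfold stepA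
      split
      · simp; omega
      · simp

-- the bridge: A's run-length accounting equals B's incremental accumulator
theorem aGo_eq_altGo (arr : List Int) (length count : Int) (h : 1 ≤ length) :
    (aGo arr (length, count)).2 + tri (aGo arr (length, count)).1
      = altGo arr (length - 1) (count + tri length) := by
  induction arr generalizing length count with
  | nil => simp [aGo, altGo]
  | cons a rest ih =>
    cases rest with
    | nil => simp [aGo, altGo]
    | cons b t =>
      have hA : ∀ st, aGo (a :: b :: t) st = aGo (b :: t) (stepA st a b) := fun _ => rfl
      have hB : ∀ cur total, altGo (a :: b :: t) cur total =
          if a < b then altGo (b :: t) (cur + 1) (total + (cur + 1)) else altGo (b :: t) 0 total :=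
        fun _ _ => rfl
      rw [hA, hB]
      unfold stepA
      by_cases hab : a < b
      · simp only [hab, if_pos]
        rw [ih (length + 1) count (by omega)]
        have : length + 1 - 1 = length - 1 + 1 := by ring
        rw [this, tri_succ]
        ring_nf
      · simp only [hab, if_false]
        rw [show PySem.Int.floordiv (length * (length - 1)) 2 = tri length from rfl,
            ih 1 (count + tri length) (by omega)]
        simp [tri_one]

-- ===== VERDICT (by name: the statement is the Claim_ definition above) =====
theorem countIncreasing_spec : Claim_equal_countIncreasing := by
  intro arr n _
  unfold Spec_countIncreasing countIncreasing countIncreasing_alt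
  rw [pyfold_eq_natfold, natfold_eq_aGo]
  have hpos := aGo_fst_pos arr (1, 0) (by norm_num)
  have hkey := aGo_eq_altGo arr 1 0 (by norm_num)
  simp only [tri_one, show (1:Int) - 1 = 0 by ring, add_zero] at hkey
  set s := aGo arr (1, 0) with hs
  by_cases h1 : s.1 = 1
  · simp only [h1, ne_eq, not_true_eq_false, if_false]
    have : tri s.1 = 0 := by rw [h1]; exact tri_one
    rw [this, add_zero] at hkey
    exact hkey
  · simp only [ne_eq, h1, not_false_eq_true, if_true]
    exact hkey
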